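-- pv_equiv track=rewrite | github.com/jero-r-cuello/USAL_altruismo | s_data_processing.py | consistency_per_D
-- ===== SOURCE A (Python) =====
-- def consistency_per_D(rta_distancia_social_n):
--     """
--
--
--     Parameters
--     ----------
--     rta_distancia_social_n :
--         Vector con las respuestas de un (1) sujeto a una (1) distancia social.
--
--     Returns
--     -------
--     consistente :
--         Boolean, True si es consistente en la distancia social, False si no lo es.
--
--     """
--     lista_rtas = list(rta_distancia_social_n)
--     if all(valor == lista_rtas[0] for valor in lista_rtas):
--         consistente = True
--         return consistente
--
--     cambios = 0
--     ultimo_cambio = 0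
--     # Iteramos para ver si cambia más de una vez (ya sabemos que una vez si cambia)
--     for i, rta in enumerate(lista_rtas):
--         # Si pasa a la opción egoísta
--         if rta != lista_rtas[ultimo_cambio]:
--             cambios += 1
--             ultimo_cambio = i
--
--     if cambios > 1:
--         consistente = False
--
--     else:
--         consistente = True
--
--     return consistente
-- ===== SOURCE B (Python) =====
-- def consistency_per_D(rta_distancia_social_n):
--     # Segment the sequence into maximal runs of equal values: the inner while
--     # skips one whole run, the outer while collects one representative per run.
--     # Consistent iff there are at most 2 runs (at most one transition).
--     xs = list(rta_distancia_social_n)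
--     n = len(xs)
--     runs = []
--     i = 0
--     while i < n:
--         head = xs[i]
--         runs.append(head)
--         while i < n and xs[i] == head:
--             i += 1
--     return len(runs) <= 2
-- ===== Notes on version B (the rewrite author's own statement) =====
-- stated objective: alternative
-- what changed: Replaced A's all-equal guard plus change-counting scan against the value at the last change index with a recursive run-length segmentation: strip maximal runs of equal values one at a time and return whether the list of runs has length at most 2.
import Mathlib
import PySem

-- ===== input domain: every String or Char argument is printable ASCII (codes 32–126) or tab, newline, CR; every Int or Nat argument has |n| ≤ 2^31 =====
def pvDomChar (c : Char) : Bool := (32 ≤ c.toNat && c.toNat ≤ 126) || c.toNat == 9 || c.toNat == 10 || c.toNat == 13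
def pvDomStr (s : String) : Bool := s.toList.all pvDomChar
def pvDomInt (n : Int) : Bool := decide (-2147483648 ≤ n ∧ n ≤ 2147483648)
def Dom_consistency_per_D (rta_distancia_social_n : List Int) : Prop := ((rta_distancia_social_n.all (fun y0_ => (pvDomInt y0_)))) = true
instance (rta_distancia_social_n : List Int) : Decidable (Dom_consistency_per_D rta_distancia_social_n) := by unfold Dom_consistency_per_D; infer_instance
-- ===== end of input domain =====

-- B replaces A's all-equal guard + change-counting scan (reference value held at the last
-- change index) by a recursive run-length segmentation: strip maximal runs of equal values
-- and test that at most 2 runs exist; objective: alternative decomposition. Both are total.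

-- ===== PORT A =====
-- lista_rtas[0] inside the all(...) generator is never evaluated on the empty list
-- (Python's all short-circuits by never running the generator), so headD 0 is exact.
def consistency_per_D (rta_distancia_social_n : List Int) : Bool :=
  let lista := rta_distancia_social_n
  if lista.all (fun valor => valor == lista.headD 0) then
    true
  else
    -- cambios, ultimo_cambio accumulated over enumerate(lista)
    let st := (PySem.List.enumerate lista 0).foldl
      (fun (s : Int × Int) (p : Int × Int) =>
        if p.2 != PySem.List.pyGetD lista s.2 0 then (s.1 + 1, p.1) else s) ((0 : Int), (0 : Int))
    if st.1 > 1 then false else true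

-- ===== PORT B =====
-- Source B's `runs`: the while loop advances i over the maximal prefix equal to lst[0]
-- (takeWhile-count), and lst[i:] drops exactly that prefix, i.e. dropWhile (== head).
def runsB : List Int → List Int
  | [] => []
  | h :: t => h :: runsB (t.dropWhile (· == h))
termination_by l => l.length
decreasing_by
  simpa using Nat.lt_succ_of_le (List.length_dropWhile_le _ _)

def consistency_per_D_alt (rta_distancia_social_n : List Int) : Bool :=
  decide ((runsB rta_distancia_social_n).length ≤ 2)

-- ===== PRECONDITION & SPEC =====
def Spec_consistency_per_D (rta_distancia_social_n : List Int) (out : Bool) : Prop := out = consistency_per_D_alt rta_distancia_social_n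
instance (rta_distancia_social_n : List Int) (out : Bool) : Decidable (Spec_consistency_per_D rta_distancia_social_n out) := by unfold Spec_consistency_per_D; infer_instance

-- ===== CLAIM (what is proved, stated in full; the proofs are below) =====
def Claim_equal_consistency_per_D : Prop := ∀ (rta_distancia_social_n : List Int), Dom_consistency_per_D rta_distancia_social_n → Spec_consistency_per_D rta_distancia_social_n (consistency_per_D rta_distancia_social_n)

-- ===== LEMMAS AND PROOFS =====

-- number of adjacent transitions, recursively (proof-side characterisation)
def transR : List Int → Int
  | x :: y :: t => (if x ≠ y then 1 else 0) + transR (y :: t)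
  | _ => 0

theorem transR_all_eq (v : Int) : ∀ (L : List Int), (∀ x ∈ L, x = v) → transR L = 0 := by
  intro L
  induction L with
  | nil => intro _; rfl
  | cons x t ih =>
    intro h
    cases t with
    | nil => rfl
    | cons y t' =>
      have hrest : transR (y :: t') = 0 := ih (fun z hz => h z (by simp [hz]))
      have hx : x = v := h x (by simp)
      have hy : y = v := h y (by simp)
      subst hx; subst hy
      simp [transR, hrest]

theorem foldA (L : List Int) : ∀ (suf pre : List Int) (c u : Int),
    pre ++ suf = L →
    PySem.List.pyGetD L u 0 = pre.getLastD 0 →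
    ((PySem.List.enumerate suf (pre.length : Int)).foldl
        (fun (s : Int × Int) (p : Int × Int) =>
          if p.2 != PySem.List.pyGetD L s.2 0 then (s.1 + 1, p.1) else s) (c, u)).1
      = c + transR (pre.getLastD 0 :: suf) := by
  intro suf
  induction suf with
  | nil => intro pre c u _ _; simp [PySem.List.enumerate, transR]
  | cons a rest ih =>
    intro pre c u hL hu
    rw [PySem.List.enumerate_cons, List.foldl_cons]
    have hL' : (pre ++ [a]) ++ rest = L := by simpa using hL
    have hlast : (pre ++ [a]).getLastD 0 = a := by simp
    have hcast : ((pre.length : Int) + 1) = (((pre ++ [a]).length : Nat) : Int) := by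
      simp
    by_cases hav : a = pre.getLastD 0
    · -- no change: state unchanged, index u still points at the run's value
      have hstep : (a != PySem.List.pyGetD L u 0) = false := by
        simp [hu, hav]
      have hu' : PySem.List.pyGetD L u 0 = (pre ++ [a]).getLastD 0 := by
        rw [hlast, hu, hav]
      have key := ih (pre ++ [a]) c u hL' hu'
      rw [hlast] at key
      simp only [hstep, Bool.false_eq_true]
      rw [if_neg not_false, hcast, key]
      simp [transR, hav]
    · -- change: cambios+1, ultimo_cambio := current index
      have hstep : (a != PySem.List.pyGetD L u 0) = true := by
        simp only [hu, bne_iff_ne]; exact fun h => hav h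
      have hu' : PySem.List.pyGetD L (pre.length : Int) 0 = (pre ++ [a]).getLastD 0 := by
        rw [hlast, ← hL', PySem.List.pyGetD_natCast]
        simp [List.getD_eq_getElem?_getD]
      have key := ih (pre ++ [a]) (c + 1) (pre.length : Int) hL' hu'
      rw [hlast] at key
      simp only [hstep]
      rw [if_pos trivial, hcast, key]
      have hne : pre.getLastD 0 ≠ a := fun hh => hav hh.symm
      have ht : transR (pre.getLastD 0 :: a :: rest) = 1 + transR (a :: rest) := by
        show (if pre.getLastD 0 ≠ a then 1 else 0) + transR (a :: rest) = _
        rw [if_pos hne]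
      rw [ht]; omega

-- A's result equals transR L ≤ 1
theorem consistency_eq_trans (L : List Int) :
    consistency_per_D L = decide (transR L ≤ 1) := by
  cases L with
  | nil => simp [consistency_per_D, transR]
  | cons x t =>
    unfold consistency_per_D
    by_cases hall : ∀ y ∈ x :: t, y = x
    · have h1 : (x :: t).all (fun valor => valor == (x :: t).headD 0) = true := by
        simp only [List.headD_cons, List.all_eq_true]
        intro y hy; simpa [beq_iff_eq] using hall y hy
      have h2 : transR (x :: t) = 0 := transR_all_eq x _ hall
      rw [if_pos h1]
      simp [h2]
    · have h1 : (x :: t).all (fun valor => valor == (x :: t).headD 0) = false := by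
        simp only [List.all_eq_false]
        rw [not_forall] at hall
        obtain ⟨y, hy⟩ := hall
        rw [Classical.not_imp] at hy
        obtain ⟨hy, hne⟩ := hy
        exact ⟨y, hy, by simp [beq_iff_eq, hne]⟩
      simp only [h1, Bool.false_eq_true, if_false]
      rw [PySem.List.enumerate_cons, List.foldl_cons]
      have hfirst : (x != PySem.List.pyGetD (x :: t) (0 : Int) 0) = false := by
        simp [PySem.List.pyGetD_zero_cons]
      have hmain := foldA (x :: t) t [x] 0 0 (by simp)
        (by simp [PySem.List.pyGetD_zero_cons])
      have hx : ([x] : List Int).getLastD 0 = x := rfl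
      have hlen : ((([x] : List Int).length : Nat) : Int) = 0 + 1 := by simp
      rw [hx, hlen] at hmain
      simp only [hfirst, Bool.false_eq_true]
      rw [if_neg not_false, hmain]
      by_cases h2 : transR (x :: t) ≤ 1
      · rw [if_neg (by omega)]; simp [h2]
      · rw [if_pos (by omega)]; simp [h2]

-- a run of copies of h in front contributes no transitions
theorem transR_run (h : Int) : ∀ (p r : List Int), (∀ x ∈ p, x = h) →
    transR (h :: (p ++ r)) = transR (h :: r) := by
  intro p
  induction p with
  | nil => intro r _; rfl
  | cons a p' ih =>
    intro r hp
    have ha : a = h := hp a (by simp)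
    subst ha
    have : transR (a :: a :: (p' ++ r)) = transR (a :: (p' ++ r)) := by
      simp [transR]
    rw [List.cons_append, this, ih r (fun x hx => hp x (by simp [hx]))]

-- run count = transitions + 1 on nonempty lists
theorem runsB_length : ∀ (L : List Int), L ≠ [] → ((runsB L).length : Int) = transR L + 1 := by
  intro L
  induction L using runsB.induct with
  | case1 => intro h; exact absurd rfl h
  | case2 h t ih =>
    intro _
    have hsplit : t.takeWhile (· == h) ++ t.dropWhile (· == h) = t :=
      List.takeWhile_append_dropWhile
    have hall : ∀ x ∈ t.takeWhile (· == h), x = h := by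
      intro x hx
      simpa [beq_iff_eq] using List.mem_takeWhile_imp hx
    have htr : transR (h :: t) = transR (h :: t.dropWhile (· == h)) := by
      conv_lhs => rw [← hsplit]
      exact transR_run h _ _ hall
    rw [runsB, htr]
    cases hd : t.dropWhile (· == h) with
    | nil => simp [transR, runsB]
    | cons y r =>
      have hyh : ¬ (y == h) = true := by
        have := List.head?_dropWhile_not (· == h) t
        rw [hd] at this; simpa using this
      have hyh' : y ≠ h := by simpa [beq_iff_eq] using hyh
      have ihy := ih (by rw [hd]; simp)
      rw [hd] at ihy
      have : transR (h :: y :: r) = 1 + transR (y :: r) := by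
        show (if h ≠ y then 1 else 0) + transR (y :: r) = _
        rw [if_pos (Ne.symm hyh')]
      rw [this]
      simp only [List.length_cons]
      push_cast at *
      omega

theorem alt_eq_trans (L : List Int) :
    consistency_per_D_alt L = decide (transR L ≤ 1) := by
  unfold consistency_per_D_alt
  cases hL : L with
  | nil => simp [runsB, transR]
  | cons x t =>
    have hlen := runsB_length (x :: t) (by simp)
    by_cases h2 : transR (x :: t) ≤ 1
    · have : (runsB (x :: t)).length ≤ 2 := by omega
      simp [this, h2]
    · have : ¬ (runsB (x :: t)).length ≤ 2 := by omega
      simp [this, h2]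

-- ===== VERDICT (by name: the statement is the Claim_ definition above) =====
theorem consistency_per_D_spec : Claim_equal_consistency_per_D := by
  intro L _
  unfold Spec_consistency_per_D
  rw [consistency_eq_trans, alt_eq_trans]
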